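-- pv_equiv track=rewrite | github.com/Tducdz/Code | Codeptit/Python/Thuchanh/mahoa3.py | drm_encode
-- ===== SOURCE A (Python) =====
-- def char_value(c):
--     return ord(c) - ord('A')
--
-- def rotate_string(s, rotate_value):
--     rotated = ""
--     for ch in s:
--         new_char = chr((char_value(ch) + rotate_value) % 26 + ord('A'))
--         rotated += new_char
--     return rotated
--
-- def merge_strings(s1, s2):
--     merged = ""
--     for i in range(len(s1)):
--         new_char = chr((char_value(s1[i]) + char_value(s2[i])) % 26 + ord('A'))
--         merged += new_char
--     return merged
--
-- def drm_encode(s):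
--     n = len(s) // 2
--     left = s[:n]
--     right = s[n:]
--
--     rotate_left_value = sum(char_value(ch) for ch in left)
--     rotate_right_value = sum(char_value(ch) for ch in right)
--
--     rotated_left = rotate_string(left, rotate_left_value)
--     rotated_right = rotate_string(right, rotate_right_value)
--
--     result = merge_strings(rotated_left, rotated_right)
--
--     return result
-- ===== SOURCE B (Python) =====
-- def drm_encode(s):
--     n = len(s) // 2
--     total = sum(ord(ch) - 65 for ch in s)
--     return ''.join(chr((ord(s[i]) + ord(s[n + i]) - 130 + total) % 26 + 65) for i in range(n))
-- ===== Notes on version B (the rewrite author's own statement) =====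
-- stated objective: simpler
-- what changed: Replaced the three passes (rotate left half, rotate right half, merge) by one total-sum pass plus a single fused per-index formula using (a%26+b%26)%26 == (a+b)%26; the odd-length trailing char still contributes only to the sum.
import Mathlib
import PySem

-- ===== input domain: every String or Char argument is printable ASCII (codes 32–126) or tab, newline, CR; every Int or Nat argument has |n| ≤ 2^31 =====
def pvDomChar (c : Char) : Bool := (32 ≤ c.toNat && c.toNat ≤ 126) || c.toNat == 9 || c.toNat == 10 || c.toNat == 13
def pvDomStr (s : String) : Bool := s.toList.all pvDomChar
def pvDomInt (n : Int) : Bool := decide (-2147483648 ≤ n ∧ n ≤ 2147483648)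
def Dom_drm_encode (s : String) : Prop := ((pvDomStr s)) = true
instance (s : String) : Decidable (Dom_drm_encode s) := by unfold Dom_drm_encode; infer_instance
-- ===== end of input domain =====

-- B fuses A's three passes (rotate each half by its digit sum, then merge) into one
-- whole-string sum plus a single per-index formula; objective: simpler.

-- ===== PORT A =====
def charValue (c : Char) : Int := (c.toNat : Int) - 65

def rotateString (s : List Char) (rotateValue : Int) : List Char :=
  s.foldl (fun rotated ch =>
    rotated ++ [Char.ofNat ((PySem.Int.mod (charValue ch + rotateValue) 26) + 65).toNat]) []

-- s1[i] / s2[i]: index i < len(s1) ≤ len(s2) at every call site, so in-range getD is exact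
def mergeStrings (s1 s2 : List Char) : List Char :=
  (List.range s1.length).foldl (fun merged i =>
    merged ++ [Char.ofNat ((PySem.Int.mod (charValue (s1.getD i 'A') + charValue (s2.getD i 'A')) 26) + 65).toNat]) []

def drm_encode (s : String) : String :=
  let l := s.toList
  let n := l.length / 2           -- len(s) // 2, nonnegative so Nat division is exact
  let left := PySem.List.slice l none (some (n : Int))
  let right := PySem.List.slice l (some (n : Int)) none
  let rotateLeftValue := left.foldl (fun a ch => a + charValue ch) 0
  let rotateRightValue := right.foldl (fun a ch => a + charValue ch) 0
  String.mk (mergeStrings (rotateString left rotateLeftValue) (rotateString right rotateRightValue))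

-- ===== PORT B =====
def drm_encode_alt (s : String) : String :=
  let l := s.toList
  let n := l.length / 2
  let total := l.foldl (fun a ch => a + ((ch.toNat : Int) - 65)) 0
  String.mk ((List.range n).map (fun i =>
    Char.ofNat ((PySem.Int.mod (((l.getD i 'A').toNat : Int) + ((l.getD (n + i) 'A').toNat : Int) - 130 + total) 26) + 65).toNat))

-- ===== PRECONDITION & SPEC =====
def Spec_drm_encode (s : String) (out : String) : Prop := out = drm_encode_alt s
instance (s : String) (out : String) : Decidable (Spec_drm_encode s out) := by unfold Spec_drm_encode; infer_instance

-- ===== CLAIM (what is proved, stated in full; the proofs are below) =====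
def Claim_equal_drm_encode : Prop := ∀ (s : String), Dom_drm_encode s → Spec_drm_encode s (drm_encode s)

-- ===== LEMMAS AND PROOFS =====

theorem foldl_append_singleton {α β : Type} (f : α → β) :
    ∀ (xs : List α) (init : List β),
      xs.foldl (fun acc x => acc ++ [f x]) init = init ++ xs.map f := by
  intro xs
  induction xs with
  | nil => simp
  | cons x xs ih => intro init; simp [List.foldl_cons, ih]

theorem foldl_add_sum (g : Char → Int) :
    ∀ (xs : List Char) (x : Int),
      xs.foldl (fun a c => a + g c) x = x + (xs.map g).sum := by
  intro xs
  induction xs with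
  | nil => simp
  | cons c cs ih => intro x; simp [List.foldl_cons, ih]; ring

theorem rotateString_eq_map (s : List Char) (r : Int) :
    rotateString s r = s.map (fun ch => Char.ofNat ((PySem.Int.mod (charValue ch + r) 26) + 65).toNat) := by
  simpa [rotateString] using foldl_append_singleton
    (fun ch => Char.ofNat ((PySem.Int.mod (charValue ch + r) 26) + 65).toNat) s []

theorem mergeStrings_eq_map (s1 s2 : List Char) :
    mergeStrings s1 s2 = (List.range s1.length).map (fun i =>
      Char.ofNat ((PySem.Int.mod (charValue (s1.getD i 'A') + charValue (s2.getD i 'A')) 26) + 65).toNat) := by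
  simpa [mergeStrings] using foldl_append_singleton
    (fun i => Char.ofNat ((PySem.Int.mod (charValue (s1.getD i 'A') + charValue (s2.getD i 'A')) 26) + 65).toNat)
    (List.range s1.length) []

theorem charValue_enc (x : Int) :
    charValue (Char.ofNat ((PySem.Int.mod x 26) + 65).toNat) = PySem.Int.mod x 26 := by
  have h0 : (0 : Int) ≤ PySem.Int.mod x 26 := PySem.Int.mod_nonneg x (by norm_num)
  have h1 : PySem.Int.mod x 26 < 26 := PySem.Int.mod_lt x (by norm_num)
  have hv : (((PySem.Int.mod x 26) + 65).toNat).isValidChar := by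
    unfold Nat.isValidChar
    left; omega
  simp only [charValue, Char.toNat_ofNat, if_pos hv]
  omega

theorem enc_add_mod (a b : Int) :
    Char.ofNat ((PySem.Int.mod (PySem.Int.mod a 26 + PySem.Int.mod b 26) 26) + 65).toNat
      = Char.ofNat ((PySem.Int.mod (a + b) 26) + 65).toNat := by
  have hm : ∀ x : Int, PySem.Int.mod x 26 = x % 26 := fun x =>
    PySem.Int.mod_eq_emod_of_pos (by norm_num)
  simp only [hm]
  rw [← Int.add_emod]

theorem drm_encode_spec_aux (s : String) : drm_encode s = drm_encode_alt s := by
  simp only [drm_encode, drm_encode_alt]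
  set l := s.toList with hl
  set n := l.length / 2 with hn
  have hleft : PySem.List.slice l none (some (n : Int)) = l.take n :=
    PySem.List.slice_to_natCast l n
  have hright : PySem.List.slice l (some (n : Int)) none = l.drop n :=
    PySem.List.slice_from_natCast l n
  rw [hleft, hright, rotateString_eq_map, rotateString_eq_map, mergeStrings_eq_map]
  have hnlen : n ≤ l.length := by omega
  have hlenL : (l.take n).length = n := by simp [List.length_take]; omega
  -- the total sum splits as left-sum + right-sum
  have hsplit : l = l.take n ++ l.drop n := (List.take_append_drop n l).symm
  have htot : l.foldl (fun a ch => a + ((ch.toNat : Int) - 65)) 0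
      = ((l.take n).map charValue).sum + ((l.drop n).map charValue).sum := by
    rw [foldl_add_sum (fun ch => ((ch.toNat : Int) - 65)) l 0]
    conv_lhs => rw [hsplit]
    simp only [List.map_append, List.sum_append, zero_add]
    rfl
  rw [foldl_add_sum charValue _ 0, foldl_add_sum charValue _ 0, htot]
  simp only [List.length_map, hlenL]
  congr 1
  apply List.map_congr_left
  intro i hi
  have hin : i < n := List.mem_range.mp hi
  have hiL : i < (l.take n).length := by omega
  have hiR : i < (l.drop n).length := by
    simp [List.length_drop]; omega
  have hgL : ((l.take n).map (fun ch => Char.ofNat ((PySem.Int.mod (charValue ch + (0 + ((l.take n).map charValue).sum)) 26) + 65).toNat)).getD i 'A'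
      = Char.ofNat ((PySem.Int.mod (charValue ((l.take n).getD i 'A') + (0 + ((l.take n).map charValue).sum)) 26) + 65).toNat := by
    rw [List.getD_eq_getElem _ _ (by simpa using hiL), List.getElem_map,
        List.getD_eq_getElem _ _ hiL]
  have hgR : ((l.drop n).map (fun ch => Char.ofNat ((PySem.Int.mod (charValue ch + (0 + ((l.drop n).map charValue).sum)) 26) + 65).toNat)).getD i 'A'
      = Char.ofNat ((PySem.Int.mod (charValue ((l.drop n).getD i 'A') + (0 + ((l.drop n).map charValue).sum)) 26) + 65).toNat := by
    rw [List.getD_eq_getElem _ _ (by simpa using hiR), List.getElem_map,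
        List.getD_eq_getElem _ _ hiR]
  rw [hgL, hgR, charValue_enc, charValue_enc]
  -- relate B's flat indexing to the halves
  have hBi : l.getD i 'A' = (l.take n).getD i 'A' := by
    rw [List.getD_eq_getElem _ _ (by omega : i < l.length),
        List.getD_eq_getElem _ _ hiL, List.getElem_take]
  have hBni : l.getD (n + i) 'A' = (l.drop n).getD i 'A' := by
    rw [List.getD_eq_getElem _ _ (by omega : n + i < l.length),
        List.getD_eq_getElem _ _ hiR, List.getElem_drop]
  rw [hBi, hBni, enc_add_mod]
  -- the remaining mod arguments are equal by unfolding charValue and rearranging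
  congr 2
  simp only [charValue]
  ring

-- ===== VERDICT (by name: the statement is the Claim_ definition above) =====
theorem drm_encode_spec : Claim_equal_drm_encode := by
  intro s _
  exact drm_encode_spec_aux s
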